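-- pv_equiv track=rewrite | github.com/jjyoung0522/PCCP-EX | 외톨이 알파벳.py | solution
-- ===== SOURCE A (Python) =====
-- def solution(input_string):
--     count = {}
--     for a in input_string:
--         if a in count:
--             count[a] += 1
--         else:
--             count[a] = 1
--
--     alpha = []
--
--     for a, number in count.items():
--         if number >= 2:
--             substring = a * number
--             if substring not in input_string:
--                 alpha.append(a)
--
--     if not alpha:
--         answer = 'N'
--     else:
--         answer = ''.join(sorted(alpha))
--     return answer
-- ===== SOURCE B (Python) =====
-- def solution(input_string):
--     # one pass: count, per character, its number of maximal consecutive runs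
--     runs = {}
--     prev = None
--     for ch in input_string:
--         if ch != prev:
--             runs[ch] = runs.get(ch, 0) + 1
--             prev = ch
--     lonely = [ch for ch, r in runs.items() if r >= 2]
--     if not lonely:
--         return 'N'
--     return ''.join(sorted(lonely))
-- ===== Notes on version B (the rewrite author's own statement) =====
-- stated objective: alternative
-- what changed: Single pass counting the maximal consecutive runs of each character (lonely iff it has >= 2 runs), replacing the character-count dict plus a per-character substring test (a*count in input_string).
import Mathlib
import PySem

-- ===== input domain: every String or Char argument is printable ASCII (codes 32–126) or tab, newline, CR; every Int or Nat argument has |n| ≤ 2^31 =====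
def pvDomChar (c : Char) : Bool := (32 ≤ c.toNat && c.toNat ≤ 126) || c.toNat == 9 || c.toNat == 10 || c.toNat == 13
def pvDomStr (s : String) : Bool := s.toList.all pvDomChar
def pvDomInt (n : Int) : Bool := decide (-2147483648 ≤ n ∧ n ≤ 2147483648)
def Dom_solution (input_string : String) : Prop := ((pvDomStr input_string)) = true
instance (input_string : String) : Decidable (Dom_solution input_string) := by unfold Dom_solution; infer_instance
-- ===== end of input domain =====

-- B replaces A's count-dict + per-character substring test by a single pass counting
-- each character's maximal consecutive runs (lonely iff ≥ 2 runs); alternative algorithm, same cost class.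

-- ===== PORT A =====
def solution (input_string : String) : String :=
  let l := input_string.toList
  let count := l.foldl
    (fun d a => if d.contains a then d.insert a (d.getD a 0 + 1) else d.insert a 1)
    PySem.Dict.empty
  let alpha := count.items.foldl
    (fun acc p =>
      if 2 ≤ p.2 then
        if PySem.Chars.isIn (PySem.List.pyRepeat [p.1] p.2) l then acc else acc ++ [p.1]
      else acc) []
  if alpha = [] then "N"
  else String.ofList (PySem.List.sorted alpha (fun x => x) false)

-- ===== PORT B =====
def solution_alt (input_string : String) : String :=
  let st := input_string.toList.foldl
    (fun (st : PySem.Dict Char Int × Option Char) ch =>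
      if st.2 ≠ some ch then (st.1.insert ch (st.1.getD ch 0 + 1), some ch) else st)
    (PySem.Dict.empty, none)
  let lonely := (st.1.items.filter (fun p => 2 ≤ p.2)).map Prod.fst
  if lonely = [] then "N"
  else String.ofList (PySem.List.sorted lonely (fun x => x) false)

-- ===== PRECONDITION & SPEC =====
def Spec_solution (input_string : String) (out : String) : Prop := out = solution_alt input_string
instance (input_string : String) (out : String) : Decidable (Spec_solution input_string out) := by unfold Spec_solution; infer_instance

-- ===== CLAIM (what is proved, stated in full; the proofs are below) =====
def Claim_equal_solution : Prop := ∀ (input_string : String), Dom_solution input_string → Spec_solution input_string (solution input_string)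

-- ===== LEMMAS AND PROOFS =====

-- run heads of a list: first character of every maximal consecutive run (prev = last seen char)
def runHeadsP : Option Char → List Char → List Char
  | _, [] => []
  | prev, x :: t => if prev = some x then runHeadsP prev t else x :: runHeadsP (some x) t

theorem runHeadsP_sublist : ∀ (l : List Char) (prev : Option Char), (runHeadsP prev l).Sublist l := by
  intro l
  induction l with
  | nil => intro prev; simp [runHeadsP]
  | cons x t ih =>
    intro prev
    simp only [runHeadsP]
    split_ifs with h
    · exact (ih prev).trans (List.sublist_cons_self x t)
    · exact (ih (some x)).cons₂ x

theorem mem_runHeadsP (c : Char) : ∀ (l : List Char) (prev : Option Char),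
    c ∈ l → prev ≠ some c → c ∈ runHeadsP prev l := by
  intro l
  induction l with
  | nil => intro prev h; simp at h
  | cons x t ih =>
    intro prev hmem hne
    simp only [runHeadsP]
    split_ifs with h
    · rcases List.mem_cons.mp hmem with rfl | hm
      · exact absurd h hne
      · exact ih prev hm hne
    · rcases List.mem_cons.mp hmem with rfl | hm
      · exact List.mem_cons_self
      · by_cases hxc : x = c
        · subst hxc; exact List.mem_cons_self
        · exact List.mem_cons_of_mem _ (ih (some x) hm (by simp [hxc]))

-- two-step unfolding of the run heads
theorem runHeadsP_none_cons_cons (a b : Char) (t : List Char) :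
    runHeadsP none (a :: b :: t) =
      if a = b then runHeadsP none (b :: t) else a :: runHeadsP none (b :: t) := by
  simp only [runHeadsP, reduceCtorEq, if_false, Option.some.injEq]
  split_ifs with h
  · subst h; rfl
  · rfl

-- S: an all-c infix carrying ALL the c's of a list that starts with c must be a prefix
theorem replicate_prefix_of_infix_head (c : Char) (w : List Char) (n : Nat)
    (hcount : (c :: w).count c = n) (h : List.replicate n c <:+: c :: w) :
    List.replicate n c <+: c :: w := by
  obtain ⟨p, q, hpq⟩ := h
  have hcp : p.count c = 0 ∧ q.count c = 0 := by
    have := hcount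
    rw [← hpq] at this
    simp [List.count_append, List.count_replicate] at this
    omega
  cases p with
  | nil => exact ⟨q, by simpa using hpq⟩
  | cons d p' =>
    have hd : d = c := by
      have : (d :: (p' ++ (List.replicate n c ++ q))) = c :: w := by simpa using hpq
      exact (List.cons.injEq _ _ _ _ ▸ this).1
    subst hd
    simp [List.count_cons] at hcp

-- D: an all-c infix descends past a non-c head
theorem replicate_infix_tail (c a : Char) (w : List Char) (m : Nat) (hca : c ≠ a)
    (h : List.replicate m c <:+: a :: w) : List.replicate m c <:+: w := by
  cases m with
  | zero => simp
  | succ m' =>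
    obtain ⟨p, q, hpq⟩ := h
    cases p with
    | nil =>
      exfalso
      have : c = a := by
        have := hpq
        simp [List.replicate_succ] at this
        exact this.1
      exact hca this
    | cons d p' =>
      have : p' ++ List.replicate (m' + 1) c ++ q = w := by
        have := hpq
        simp only [List.cons_append, List.cons.injEq] at this
        exact this.2
      exact ⟨p', q, this⟩

-- a one-c prefix peels off
theorem replicate_succ_prefix_tail (c : Char) (w : List Char) (m : Nat)
    (h : List.replicate (m + 1) c <+: c :: w) : List.replicate m c <+: w := by
  rw [List.replicate_succ] at h
  exact (List.cons_prefix_cons.mp h).2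

-- MAIN, direction infix → at most one run
theorem rc_le_one_of_infix (c : Char) : ∀ (l : List Char),
    List.replicate (l.count c) c <:+: l → (runHeadsP none l).count c ≤ 1
  | [] => by intro _; simp [runHeadsP]
  | [a] => by
    intro _
    by_cases h : a = c <;> simp [runHeadsP, List.count_cons, h]
  | a :: b :: t => by
    intro hinf
    have := hinf
    rw [runHeadsP_none_cons_cons]
    split_ifs with hab
    · -- a = b : same run heads as b :: t
      subst hab
      by_cases hca : c = a
      · subst hca
        have hn : (c :: c :: t).count c = (c :: t).count c + 1 := by
          simp [List.count_cons]
        rw [hn] at hinf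
        have hpre := replicate_prefix_of_infix_head c (c :: t) ((c :: t).count c + 1) (by simp [List.count_cons]) hinf
        have := replicate_succ_prefix_tail c (c :: t) ((c :: t).count c) hpre
        exact rc_le_one_of_infix c (c :: t) this.isInfix
      · have hn : (a :: a :: t).count c = (a :: t).count c := by
          have hac : ¬a = c := fun hh => hca hh.symm; simp [List.count_cons, hac]
        rw [hn] at hinf
        have hac : ¬a = c := fun h => hca h.symm
        exact rc_le_one_of_infix c (a :: t) (replicate_infix_tail c a (a :: t) _ hca hinf)
    · by_cases hca : c = a
      · -- c = a is a run head; show c does not occur in b :: t at all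
        subst hca
        have hzero : (b :: t).count c = 0 := by
          by_contra hne
          have hm : 1 ≤ (b :: t).count c := Nat.one_le_iff_ne_zero.mpr hne
          have hn : (c :: b :: t).count c = (b :: t).count c + 1 := by simp [List.count_cons]
          rw [hn] at hinf
          have hpre := replicate_prefix_of_infix_head c (b :: t) ((b :: t).count c + 1) (by simp [List.count_cons]) hinf
          have htail := replicate_succ_prefix_tail c (b :: t) ((b :: t).count c) hpre
          -- a replicate of length ≥ 1 prefixing b :: t forces b = c
          have hb : b = c := by
            obtain ⟨m', hm'⟩ : ∃ m', (b :: t).count c = m' + 1 := ⟨(b :: t).count c - 1, by omega⟩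
            rw [hm'] at htail
            rw [List.replicate_succ] at htail
            exact ((List.cons_prefix_cons.mp htail).1).symm
          exact hab hb.symm
        have hnot : c ∉ runHeadsP none (b :: t) := by
          intro hmem
          have : c ∈ b :: t := (runHeadsP_sublist (b :: t) none).mem hmem
          rw [← List.count_pos_iff] at this
          omega
        simp [List.count_eq_zero_of_not_mem hnot]
      · have hn : (a :: b :: t).count c = (b :: t).count c := by
          have hac : ¬a = c := fun hh => hca hh.symm; simp [List.count_cons, hac]
        rw [hn] at hinf
        have hac : ¬a = c := fun h => hca h.symm
        have := rc_le_one_of_infix c (b :: t) (replicate_infix_tail c a (b :: t) _ hca hinf)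
        simp [List.count_cons, hac]
        omega

-- MAIN, direction at most one run → infix
theorem infix_of_rc_le_one (c : Char) : ∀ (l : List Char),
    (runHeadsP none l).count c ≤ 1 → List.replicate (l.count c) c <:+: l
  | [] => by intro _; simp
  | [a] => by
    intro _
    by_cases h : a = c
    · subst h; simp [List.count_cons]
    · simp [List.count_cons, h]
  | a :: b :: t => by
    intro hrc
    rw [runHeadsP_none_cons_cons] at hrc
    split_ifs at hrc with hab
    · subst hab
      have ih := infix_of_rc_le_one c (a :: t) hrc
      by_cases hca : c = a
      · subst hca
        have hpre := replicate_prefix_of_infix_head c t ((c :: t).count c) rfl ih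
        have hn : (c :: c :: t).count c = (c :: t).count c + 1 := by simp [List.count_cons]
        rw [hn, List.replicate_succ]
        exact (List.cons_prefix_cons.mpr ⟨rfl, hpre⟩).isInfix
      · have hn : (a :: a :: t).count c = (a :: t).count c := by have hac : ¬a = c := fun hh => hca hh.symm; simp [List.count_cons, hac]
        rw [hn]
        exact ih.trans (List.suffix_cons a (a :: t)).isInfix
    · by_cases hca : c = a
      · subst hca
        have hzero : (b :: t).count c = 0 := by
          by_contra hne
          have hmem : c ∈ b :: t := by
            rw [← List.count_pos_iff]; omega
          have : c ∈ runHeadsP none (b :: t) := mem_runHeadsP c (b :: t) none hmem (by simp)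
          rw [← List.count_pos_iff] at this
          simp [List.count_cons] at hrc
          omega
        have hn : (c :: b :: t).count c = 1 := by simp [List.count_cons, hzero]
        rw [hn]
        exact (List.prefix_cons_inj c |>.mpr (List.nil_prefix)).isInfix
      · have hrc' : (runHeadsP none (b :: t)).count c ≤ 1 := by
          have hac : ¬a = c := fun hh => hca hh.symm; simp [List.count_cons, hac] at hrc
          omega
        have ih := infix_of_rc_le_one c (b :: t) hrc'
        have hn : (a :: b :: t).count c = (b :: t).count c := by have hac : ¬a = c := fun hh => hca hh.symm; simp [List.count_cons, hac]
        rw [hn]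
        exact ih.trans (List.suffix_cons a (b :: t)).isInfix

-- B's fold equals: insert-counting fold over the run heads, paired with the final prev
theorem foldB_eq (l : List Char) : ∀ (d : PySem.Dict Char Int) (prev : Option Char),
    l.foldl (fun (st : PySem.Dict Char Int × Option Char) ch =>
        if st.2 ≠ some ch then (st.1.insert ch (st.1.getD ch 0 + 1), some ch) else st)
      (d, prev)
    = ((runHeadsP prev l).foldl (fun d x => d.insert x (d.getD x 0 + 1)) d,
       (runHeadsP prev l).foldl (fun _ x => some x) prev) := by
  induction l with
  | nil => intro d prev; simp [runHeadsP]
  | cons x t ih =>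
    intro d prev
    rw [List.foldl_cons]
    by_cases h : prev = some x
    · subst h
      rw [if_neg (by simp), show runHeadsP (some x) (x :: t) = runHeadsP (some x) t from by simp [runHeadsP]]
      exact ih d (some x)
    · rw [if_pos (by simpa using h),
          show runHeadsP prev (x :: t) = x :: runHeadsP (some x) t from by simp [runHeadsP, h],
          List.foldl_cons, List.foldl_cons]
      exact ih (d.insert x (d.getD x 0 + 1)) (some x)

-- A's counting loop is the Counter fold
theorem foldA_eq_counter (l : List Char) :
    l.foldl (fun d a => if d.contains a then d.insert a (d.getD a 0 + 1) else d.insert a 1)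
      PySem.Dict.empty = PySem.Dict.counter l := by
  rw [← PySem.Dict.foldl_insert_getD_add_one_eq_counter]
  congr 1
  funext d a
  by_cases h : d.contains a
  · simp [h]
  · simp [h, PySem.Dict.getD_of_not_contains d 0 (by simpa using h)]

-- lonely characters: ≥ 2 total occurrences and not all consecutive ↔ ≥ 2 run heads
theorem lonely_iff (l : List Char) (x : Char) :
    (x ∈ l ∧ 2 ≤ l.count x ∧ ¬ List.replicate (l.count x) x <:+: l) ↔
    (x ∈ runHeadsP none l ∧ 2 ≤ (runHeadsP none l).count x) := by
  constructor
  · rintro ⟨hm, h2, hni⟩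
    have h1 : ¬ (runHeadsP none l).count x ≤ 1 := fun hle => hni (infix_of_rc_le_one x l hle)
    exact ⟨by rw [← List.count_pos_iff]; omega, by omega⟩
  · rintro ⟨hm, h2⟩
    have hle := (runHeadsP_sublist l none).count_le x
    refine ⟨by rw [← List.count_pos_iff]; omega, by omega, fun hinf => ?_⟩
    have := rc_le_one_of_infix x l hinf
    omega

-- the two lonely lists are permutations of each other
theorem lonely_perm (l : List Char) :
    (((PySem.Dict.counter l).items.foldl
        (fun acc p =>
          if 2 ≤ p.2 then
            if PySem.Chars.isIn (PySem.List.pyRepeat [p.1] p.2) l then acc else acc ++ [p.1]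
          else acc) []) : List Char).Perm
      (((PySem.Dict.counter (runHeadsP none l)).items.filter (fun p => 2 ≤ p.2)).map Prod.fst) := by
  have hstep : (fun (acc : List Char) (p : Char × Int) =>
      if 2 ≤ p.2 then
        if PySem.Chars.isIn (PySem.List.pyRepeat [p.1] p.2) l then acc else acc ++ [p.1]
      else acc)
      = (fun acc p =>
          if (decide (2 ≤ p.2) && !PySem.Chars.isIn (PySem.List.pyRepeat [p.1] p.2) l) = true
          then acc ++ [p.1] else acc) := by
    funext acc p
    simp only [PySem.List.pyRepeat_singleton]
    by_cases h1 : 2 ≤ p.2 <;>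
      cases h2 : PySem.Chars.isIn (List.replicate p.2.toNat p.1) l <;> simp [h1, h2]
  rw [hstep, PySem.List.foldl_append_if, PySem.Dict.items_counter, PySem.Dict.items_counter,
      List.filter_map, List.filter_map, List.map_map, List.map_map]
  apply (List.perm_ext_iff_of_nodup ?_ ?_).mpr
  · intro x
    simp only [List.nil_append, List.mem_map, List.mem_filter, Function.comp_apply,
      PySem.Set.mem_ofList, Bool.and_eq_true, decide_eq_true_eq, Bool.not_eq_true',
      PySem.List.pyRepeat_singleton, Int.toNat_natCast, PySem.Chars.isIn_eq_false_iff,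
      Nat.ofNat_le_cast]
    constructor
    · rintro ⟨k, ⟨hk, h2, hni⟩, rfl⟩
      exact ⟨k, ⟨((lonely_iff l k).mp ⟨hk, h2, hni⟩).1, ((lonely_iff l k).mp ⟨hk, h2, hni⟩).2⟩, rfl⟩
    · rintro ⟨k, ⟨hk, h2⟩, rfl⟩
      have := (lonely_iff l k).mpr ⟨hk, h2⟩
      exact ⟨k, ⟨this.1, this.2.1, this.2.2⟩, rfl⟩
  · exact (List.Nodup.filter _ (PySem.Set.nodup_ofList l)).map (fun a b h => h)
  · exact (List.Nodup.filter _ (PySem.Set.nodup_ofList _)).map (fun a b h => h)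

-- the common tail: empty → "N", else the sorted join; permutations give equal results
theorem final_eq (A B : List Char) (h : A.Perm B) :
    (if A = [] then "N" else String.ofList (PySem.List.sorted A (fun x => x) false)) =
    (if B = [] then "N" else String.ofList (PySem.List.sorted B (fun x => x) false)) := by
  by_cases hA : A = []
  · have hB : B = [] := ((hA ▸ h : ([] : List Char).Perm B)).symm.eq_nil
    simp [hA, hB]
  · have hB : B ≠ [] := fun hb => hA ((hb ▸ h : A.Perm []).eq_nil)
    rw [if_neg hA, if_neg hB,
        PySem.List.sorted_eq_sorted_of_perm A B (fun x => x) (fun a b hh => hh) h]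

-- ===== VERDICT (by name: the statement is the Claim_ definition above) =====
theorem solution_spec : Claim_equal_solution := by
  intro s _hdom
  unfold Spec_solution
  show solution s = solution_alt s
  simp only [solution, solution_alt]
  rw [foldA_eq_counter, foldB_eq s.toList PySem.Dict.empty none,
      PySem.Dict.foldl_insert_getD_add_one_eq_counter]
  exact final_eq _ _ (lonely_perm s.toList)
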